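-- pv_equiv track=rewrite | github.com/jacob-w-gable/tntech-research-day-2023 | format_data.py | reverse_moves
-- ===== SOURCE A (Python) =====
-- import string
--
-- def reverse_moves(scramble: string) -> string:
--     moves = scramble.split(' ')
--     new_moves = []
--
--     for move in moves:
--         if move == "F":
--             new_moves.append("F'")
--         elif move == "B":
--             new_moves.append("B'")
--         elif move == "L":
--             new_moves.append("L'")
--         elif move == "R":
--             new_moves.append("R'")
--         elif move == "U":
--             new_moves.append("U'")
--         elif move == "D":
--             new_moves.append("D'")
--         elif move == "F'":
--             new_moves.append("F")
--         elif move == "B'":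
--             new_moves.append("B")
--         elif move == "L'":
--             new_moves.append("L")
--         elif move == "R'":
--             new_moves.append("R")
--         elif move == "U'":
--             new_moves.append("U")
--         elif move == "D'":
--             new_moves.append("D")
--         else:
--             new_moves.append(move)
--
--     solution = ""
--     for move in new_moves:
--         solution = move + " " + solution
--     solution = solution.strip()
--
--     return solution
-- ===== SOURCE B (Python) =====
-- import string
--
-- def reverse_moves(scramble: string) -> string:
--     # Recursive decomposition: no reversed list, no intermediate list of moves.
--     # The recursion itself emits the tokens back-to-front, inverting each by a
--     # shape rule (single valid face -> add "'", face+"'" -> drop it).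
--     faces = "FBLRUD"
--
--     def go(tokens):
--         head = tokens[0]
--         if len(head) == 1 and head in faces:
--             head = head + "'"
--         elif len(head) == 2 and head[1] == "'" and head[0] in faces:
--             head = head[0]
--         rest = tokens[1:]
--         if not rest:
--             return head
--         return go(rest) + " " + head
--
--     return go(scramble.split(' ')).strip()
-- ===== Notes on version B (the rewrite author's own statement) =====
-- stated objective: simpler
-- what changed: Replaces A's three staged passes (12-branch if/elif mapping into an intermediate list, then a quadratic string-prepending loop, then strip) with one recursive function over the token list whose recursion order emits the inverted tokens back-to-front directly, inverting each token by a shape rule instead of a case table.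
import Mathlib
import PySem

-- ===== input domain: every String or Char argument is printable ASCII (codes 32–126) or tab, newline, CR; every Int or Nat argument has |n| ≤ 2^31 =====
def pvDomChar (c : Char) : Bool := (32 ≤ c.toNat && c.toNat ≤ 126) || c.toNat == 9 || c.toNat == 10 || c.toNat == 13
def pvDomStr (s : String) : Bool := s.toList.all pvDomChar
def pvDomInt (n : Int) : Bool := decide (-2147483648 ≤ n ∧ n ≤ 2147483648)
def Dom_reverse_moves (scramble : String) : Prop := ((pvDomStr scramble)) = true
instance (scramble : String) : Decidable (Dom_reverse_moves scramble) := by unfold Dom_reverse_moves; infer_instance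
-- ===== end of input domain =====

-- B replaces A's staged passes (12-branch mapping into a list, then a string-prepending
-- loop, then strip) with one recursion over the token list that emits the inverted
-- tokens back-to-front directly (objective: simpler).

-- ===== PORT A =====
-- the body of A's first for-loop: the 12-way if/elif chain choosing what to append
def pvInvA (move : List Char) : List Char :=
  if move = ['F'] then ['F', '\'']
  else if move = ['B'] then ['B', '\'']
  else if move = ['L'] then ['L', '\'']
  else if move = ['R'] then ['R', '\'']
  else if move = ['U'] then ['U', '\'']
  else if move = ['D'] then ['D', '\'']
  else if move = ['F', '\''] then ['F']
  else if move = ['B', '\''] then ['B']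
  else if move = ['L', '\''] then ['L']
  else if move = ['R', '\''] then ['R']
  else if move = ['U', '\''] then ['U']
  else if move = ['D', '\''] then ['D']
  else move

def reverse_moves (scramble : String) : String :=
  let moves := PySem.Chars.splitOn scramble.toList [' ']
  let new_moves := moves.foldl (fun new_moves move => new_moves ++ [pvInvA move]) []
  let solution := new_moves.foldl (fun solution move => move ++ [' '] ++ solution) []
  String.ofList (PySem.Chars.strip solution)

-- ===== PORT B =====
def pvFacesB : List Char := ['F', 'B', 'L', 'R', 'U', 'D']

-- B's shape-rule inversion of one token (the 'head = …' branches of go)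
def pvInvB (t : List Char) : List Char :=
  match t with
  | [c] => if pvFacesB.contains c then [c, '\''] else [c]
  | [c0, c1] => if c1 = '\'' && pvFacesB.contains c0 then [c0] else [c0, c1]
  | _ => t

-- B's go: recursion emits inverted tokens back-to-front; [] is unreachable
-- (split(' ') never returns an empty list, and go stops before recursing on [])
def pvGo : List (List Char) → List Char
  | [] => []
  | t :: rest =>
    let head := pvInvB t
    if rest = [] then head else pvGo rest ++ [' '] ++ head

def reverse_moves_alt (scramble : String) : String :=
  String.ofList (PySem.Chars.strip (pvGo (PySem.Chars.splitOn scramble.toList [' '])))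

-- ===== PRECONDITION & SPEC =====
def Spec_reverse_moves (scramble : String) (out : String) : Prop := out = reverse_moves_alt scramble
instance (scramble : String) (out : String) : Decidable (Spec_reverse_moves scramble out) := by unfold Spec_reverse_moves; infer_instance

-- ===== CLAIM (what is proved, stated in full; the proofs are below) =====
def Claim_equal_reverse_moves : Prop := ∀ (scramble : String), Dom_reverse_moves scramble → Spec_reverse_moves scramble (reverse_moves scramble)

-- ===== LEMMAS AND PROOFS =====

-- the two inverters agree on every token
theorem pvInvA_eq_pvInvB (t : List Char) : pvInvA t = pvInvB t := by
  unfold pvInvA pvInvB pvFacesB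
  rcases t with _ | ⟨a, _ | ⟨b, _ | ⟨c, t⟩⟩⟩ <;> simp <;> split_ifs <;> simp_all

-- A's append loop is a map
theorem pv_foldl_append_map (ms : List (List Char)) (acc : List (List Char)) :
    ms.foldl (fun acc move => acc ++ [pvInvA move]) acc = acc ++ ms.map pvInvA := by
  induction ms generalizing acc with
  | nil => simp
  | cons m ms ih => simp [ih]

-- A's prepend loop concatenates the space-suffixed tokens in reverse
theorem pv_foldl_prepend (ms : List (List Char)) (acc : List Char) :
    ms.foldl (fun solution move => move ++ [' '] ++ solution) acc
      = ((ms.map (· ++ [' '])).reverse).flatten ++ acc := by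
  induction ms generalizing acc with
  | nil => simp
  | cons m ms ih => rw [List.foldl_cons, ih]; simp

-- on a nonempty token list, A's reversed concatenation is B's go plus one trailing space
theorem pv_flatten_eq_go (rest : List (List Char)) (t : List Char) :
    ((((t :: rest).map pvInvA).map (· ++ [' '])).reverse).flatten
      = pvGo (t :: rest) ++ [' '] := by
  induction rest generalizing t with
  | nil => simp [pvGo, pvInvA_eq_pvInvB]
  | cons r rs ih =>
    calc ((((t :: r :: rs).map pvInvA).map (· ++ [' '])).reverse).flatten
        = ((((r :: rs).map pvInvA).map (· ++ [' '])).reverse).flatten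
            ++ (pvInvA t ++ [' ']) := by simp
      _ = (pvGo (r :: rs) ++ [' ']) ++ (pvInvA t ++ [' ']) := by rw [ih]
      _ = pvGo (t :: r :: rs) ++ [' '] := by
            simp [pvGo, pvInvA_eq_pvInvB]

theorem pv_rstrip_space (x : List Char) :
    PySem.Chars.rstrip (x ++ [' ']) = PySem.Chars.rstrip x := by
  simp [PySem.Chars.rstrip, PySem.Chars.isspace]

theorem pv_strip_space (x : List Char) :
    PySem.Chars.strip (x ++ [' ']) = PySem.Chars.strip x := by
  unfold PySem.Chars.strip PySem.Chars.lstrip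
  rw [List.dropWhile_append]
  by_cases h : (x.dropWhile PySem.Chars.isspace).isEmpty
  · rw [if_pos h, List.isEmpty_iff.mp h,
      show List.dropWhile PySem.Chars.isspace [' '] = [] from by decide]
  · rw [if_neg (by simp [h])]
    exact pv_rstrip_space _

-- ===== VERDICT (by name: the statement is the Claim_ definition above) =====
theorem reverse_moves_spec : Claim_equal_reverse_moves := by
  intro scramble _
  unfold Spec_reverse_moves reverse_moves reverse_moves_alt
  simp only [pv_foldl_append_map, pv_foldl_prepend, List.nil_append, List.append_nil]
  cases h : PySem.Chars.splitOn scramble.toList [' '] with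
  | nil => simp [pvGo]
  | cons t rest => rw [pv_flatten_eq_go, pv_strip_space]
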